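-- pv_equiv track=rewrite | github.com/chrandalf/valuemap-uk | pipeline/flood_monitoring_api_client.py | merge_archive_csv_texts
-- ===== SOURCE A (Python) =====
-- def merge_archive_csv_texts(chunks: list[str]) -> str:
--     merged_lines: list[str] = []
--     header: str | None = None
--     for chunk in chunks:
--         lines = chunk.splitlines()
--         if not lines:
--             continue
--         current_header = lines[0]
--         if header is None:
--             header = current_header
--             merged_lines.append(header)
--         elif current_header != header:
--             raise RuntimeError("Archive CSV headers differ across dates; cannot merge safely")
--         merged_lines.extend(lines[1:])
--     return "\n".join(merged_lines) + ("\n" if merged_lines else "")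
-- ===== SOURCE B (Python) =====
-- def merge_archive_csv_texts(chunks: list[str]) -> str:
--     parsed = [lines for lines in (chunk.splitlines() for chunk in chunks) if lines]
--     if not parsed:
--         return ""
--     header = parsed[0][0]
--     for lines in parsed:
--         if lines[0] != header:
--             raise RuntimeError("Archive CSV headers differ across dates; cannot merge safely")
--     merged = [header]
--     for lines in parsed:
--         merged.extend(lines[1:])
--     return "\n".join(merged) + "\n"
-- ===== Notes on version B (the rewrite author's own statement) =====
-- stated objective: simpler
-- what changed: Replaces A's single stateful fold carrying an Optional header and a growing line buffer by a parse-then-validate-then-concatenate decomposition: parse all chunks once keeping the non-empty ones, validate every first line against the first chunk's, then concatenate header plus tails.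
import Mathlib
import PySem

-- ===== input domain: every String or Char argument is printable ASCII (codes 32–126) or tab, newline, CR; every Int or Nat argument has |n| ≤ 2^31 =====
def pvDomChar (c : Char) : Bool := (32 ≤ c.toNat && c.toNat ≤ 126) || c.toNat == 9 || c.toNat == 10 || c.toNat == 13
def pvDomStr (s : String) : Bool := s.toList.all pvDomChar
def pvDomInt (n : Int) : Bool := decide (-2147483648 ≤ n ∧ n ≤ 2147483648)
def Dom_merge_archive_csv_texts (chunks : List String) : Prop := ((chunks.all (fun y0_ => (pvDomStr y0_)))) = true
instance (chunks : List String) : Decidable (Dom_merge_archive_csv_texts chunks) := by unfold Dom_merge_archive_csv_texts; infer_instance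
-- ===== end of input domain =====

-- ===== PORT A =====
-- Header line: B replaces A's stateful fold by a parse/validate/concatenate decomposition (simpler); equal return values proved; mismatched headers (where both raise RuntimeError) are outside Pre_.
-- Fold state = (merged_lines, header); the `raise` branch is unreachable inside Pre_ and leaves the state unchanged here.
def mergeStepA (st : List String × Option String) (chunk : String) : List String × Option String :=
  match PySem.Str.splitlines chunk with
  | [] => st
  | cur :: rest =>          -- cur = lines[0], rest = lines[1:]
    match st.2 with
    | none => (st.1 ++ [cur] ++ rest, some cur)
    | some h => if cur ≠ h then st else (st.1 ++ rest, some h)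

def merge_archive_csv_texts (chunks : List String) : String :=
  let ml := (chunks.foldl mergeStepA ([], none)).1
  PySem.Str.join "\n" ml ++ (if ml ≠ [] then "\n" else "")

-- ===== PORT B =====
def merge_archive_csv_texts_alt (chunks : List String) : String :=
  let parsed := (chunks.map PySem.Str.splitlines).filter (· ≠ [])
  match parsed with
  | [] => ""
  | p :: _ =>
    let header := p.headD ""   -- p ≠ [] by the filter, so headD = p[0]
    if parsed.all (fun l => l.headD "" == header) then
      PySem.Str.join "\n" (header :: parsed.flatMap (·.tail)) ++ "\n"
    else ""                    -- raise RuntimeError: outside Pre_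

-- ===== PRECONDITION & SPEC =====
-- Pre_ excludes exactly the inputs on which A raises RuntimeError: two non-empty
-- parsed chunks with different first lines (B raises the identical error there).
def Pre_merge_archive_csv_texts (chunks : List String) : Prop :=
  ∀ l₁ ∈ (chunks.map PySem.Str.splitlines).filter (· ≠ []),
  ∀ l₂ ∈ (chunks.map PySem.Str.splitlines).filter (· ≠ []),
    l₁.headD "" = l₂.headD ""
instance (chunks : List String) : Decidable (Pre_merge_archive_csv_texts chunks) := by unfold Pre_merge_archive_csv_texts; infer_instance
def pvWitness_merge_archive_csv_texts : List String := ["h\na", "", "h\nb\nc"]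
def Spec_merge_archive_csv_texts (chunks : List String) (out : String) : Prop := out = merge_archive_csv_texts_alt chunks
instance (chunks : List String) (out : String) : Decidable (Spec_merge_archive_csv_texts chunks out) := by unfold Spec_merge_archive_csv_texts; infer_instance

-- ===== CLAIM (what is proved, stated in full; the proofs are below) =====
def Claim_equal_merge_archive_csv_texts : Prop := ∀ (chunks : List String), Dom_merge_archive_csv_texts chunks → Pre_merge_archive_csv_texts chunks → Spec_merge_archive_csv_texts chunks (merge_archive_csv_texts chunks)

-- ===== LEMMAS AND PROOFS =====

theorem foldA_some (chunks : List String) (acc : List String) (h : String)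
    (hall : ∀ l ∈ (chunks.map PySem.Str.splitlines).filter (· ≠ []), l.headD "" = h) :
    chunks.foldl mergeStepA (acc, some h)
      = (acc ++ ((chunks.map PySem.Str.splitlines).filter (· ≠ [])).flatMap (·.tail), some h) := by
  induction chunks generalizing acc with
  | nil => simp
  | cons c cs ih =>
    simp only [List.foldl_cons]
    rcases hsp : PySem.Str.splitlines c with _ | ⟨cur, rest⟩
    · have : mergeStepA (acc, some h) c = (acc, some h) := by
        simp [mergeStepA, hsp]
      rw [this, ih]
      · simp [hsp]
      · intro l hl
        exact hall l (by simp [hsp]; exact (by simpa using hl))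
    · have hcur : cur = h := by
        have := hall (cur :: rest) (by simp [hsp])
        simpa using this
      have : mergeStepA (acc, some h) c = (acc ++ rest, some h) := by
        simp [mergeStepA, hsp, hcur]
      rw [this, ih]
      · simp [hsp]
      · intro l hl
        exact hall l (by simp [hsp]; right; simpa using hl)

theorem merge_archive_csv_texts_spec : Claim_equal_merge_archive_csv_texts := by
  intro chunks hdom hpre
  unfold Spec_merge_archive_csv_texts merge_archive_csv_texts merge_archive_csv_texts_alt
  induction chunks with
  | nil => simp [PySem.Str.join]
  | cons c cs ih =>
    have hdom' : Dom_merge_archive_csv_texts cs := by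
      simpa [Dom_merge_archive_csv_texts] using And.right (by simpa [Dom_merge_archive_csv_texts] using hdom)
    rcases hsp : PySem.Str.splitlines c with _ | ⟨cur, rest⟩
    · -- first chunk parses empty: drops out of both sides
      have hpre' : Pre_merge_archive_csv_texts cs := by
        intro l₁ h₁ l₂ h₂
        exact hpre l₁ (by simp [hsp]; simpa using h₁) l₂ (by simp [hsp]; simpa using h₂)
      have := ih hdom' hpre'
      simpa [List.foldl_cons, mergeStepA, hsp] using this
    · -- first chunk non-empty: it supplies the header
      have hall : ∀ l ∈ (cs.map PySem.Str.splitlines).filter (· ≠ []), l.headD "" = cur := by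
        intro l hl
        have := hpre l (by simp [hsp]; right; simpa using hl) (cur :: rest) (by simp [hsp])
        simpa using this
      have hstep : mergeStepA ([], none) c = (cur :: rest, some cur) := by
        simp [mergeStepA, hsp]
      have hfold := foldA_some cs (cur :: rest) cur hall
      have hcond : ∀ x ∈ cs, PySem.Str.splitlines x = [] ∨ (PySem.Str.splitlines x).head?.getD "" = cur := by
        intro x hx
        rcases hx2 : PySem.Str.splitlines x with _ | ⟨y, ys⟩
        · exact Or.inl rfl
        · refine Or.inr ?_
          have hmem : (y :: ys) ∈ (cs.map PySem.Str.splitlines).filter (· ≠ []) := by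
            simp only [List.mem_filter, List.mem_map]
            exact ⟨⟨x, hx, hx2⟩, by simp⟩
          have := hall (y :: ys) hmem
          simpa [hx2] using this
      simp [List.foldl_cons, hstep, hfold, hsp, List.flatMap]
      intro x hx hne
      exact (hcond x hx).resolve_left hne
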